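-- pv_equiv track=rewrite | github.com/alexandraback/datacollection | solutions_5631989306621952_0/Python/lenkatilka/LastWord.py | findLatest
-- ===== SOURCE A (Python) =====
-- def findLatest(string):
--
-- 	if not string: return string
--
-- 	latest = string[0]
--
-- 	for chInd in range(1, len(string)):
-- 		if string[chInd] >= latest[0]:
-- 			latest = string[chInd] + latest
-- 		else:
-- 			latest = latest + string[chInd]
-- 	return(latest)
-- ===== SOURCE B (Python) =====
-- def findLatest(string):
--     if not string:
--         return string
--     # stage 1: prefix-maximum array (maxes[i] = max(string[:i+1]))
--     maxes = []
--     m = string[0]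
--     for c in string:
--         m = max(m, c)
--         maxes.append(m)
--     # stage 2: pair each later char with the prefix max before it, partition declaratively
--     pairs = list(zip(string[1:], maxes))
--     front = [c for c, pm in pairs if c >= pm]
--     back = [c for c, pm in pairs if c < pm]
--     return ''.join(reversed(front)) + string[0] + ''.join(back)
-- ===== Notes on version B (the rewrite author's own statement) =====
-- stated objective: faster
-- what changed: A grows the result string by prepend/append inside one accumulating loop (quadratic concatenation); B first builds a prefix-maximum array, zips each later char with the prefix max before it, partitions the pairs with two declarative filters, and joins once.
import Mathlib
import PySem

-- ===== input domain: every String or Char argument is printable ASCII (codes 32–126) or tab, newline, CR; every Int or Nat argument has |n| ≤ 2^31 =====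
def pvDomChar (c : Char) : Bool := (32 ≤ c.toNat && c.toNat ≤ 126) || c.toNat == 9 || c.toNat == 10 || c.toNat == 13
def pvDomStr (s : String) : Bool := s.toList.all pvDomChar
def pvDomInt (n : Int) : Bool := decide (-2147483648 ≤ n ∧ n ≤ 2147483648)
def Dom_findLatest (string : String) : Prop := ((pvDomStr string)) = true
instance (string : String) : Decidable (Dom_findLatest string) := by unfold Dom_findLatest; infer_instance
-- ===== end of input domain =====

-- B replaces A's quadratic prepend/append string accumulation with a staged plan:
-- a prefix-maximum array, a zip of later chars with their prior prefix max, two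
-- declarative filters partitioning the pairs, and a single final join (faster).


-- ===== PORT A =====
-- A's loop: latest := string[0]; for each later char c, prepend if c ≥ latest[0] else append.
-- latest is nonempty throughout, so 'latest.headD ' '' is exactly Python's latest[0] here.
def findLatestLoopA : List Char → List Char → List Char
  | latest, [] => latest
  | latest, c :: rest =>
      if latest.headD ' ' ≤ c then findLatestLoopA (c :: latest) rest
      else findLatestLoopA (latest ++ [c]) rest

def findLatest (string : String) : String :=
  match string.toList with
  | [] => string
  | c :: rest => String.mk (findLatestLoopA [c] rest)

-- ===== PORT B =====
-- stage 1 of Source B: the prefix-maximum array (m = max(m, c); maxes.append(m))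
def buildMaxes : Char → List Char → List Char
  | _, [] => []
  | m, c :: rest => (max m c) :: buildMaxes (max m c) rest

def findLatest_alt (string : String) : String :=
  match string.toList with
  | [] => string
  | c0 :: rest =>
      let maxes := buildMaxes c0 (c0 :: rest)
      let pairs := rest.zip maxes          -- zip(string[1:], maxes)
      let front := (pairs.filter (fun p => p.2 ≤ p.1)).map Prod.fst
      let back := (pairs.filter (fun p => p.1 < p.2)).map Prod.fst
      String.mk (front.reverse ++ (c0 :: back))

-- ===== PRECONDITION & SPEC =====
def Spec_findLatest (string : String) (out : String) : Prop := out = findLatest_alt string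
instance (string : String) (out : String) : Decidable (Spec_findLatest string out) := by unfold Spec_findLatest; infer_instance

-- ===== CLAIM (what is proved, stated in full; the proofs are below) =====
def Claim_equal_findLatest : Prop := ∀ (string : String), Dom_findLatest string → Spec_findLatest string (findLatest string)

-- ===== LEMMAS AND PROOFS =====

-- Proof-side characterisation: the record chars (≥ running max) and the rest.
def recsF : Char → List Char → List Char
  | _, [] => []
  | mx, c :: rest => if mx ≤ c then c :: recsF c rest else recsF mx rest

def recsB : Char → List Char → List Char
  | _, [] => []
  | mx, c :: rest => if mx ≤ c then recsB c rest else c :: recsB mx rest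

-- A's loop appends the record chars (reversed) in front and the rest behind.
theorem loopA_char (rest : List Char) :
    ∀ latest : List Char, latest ≠ [] →
      findLatestLoopA latest rest
        = (recsF (latest.headD ' ') rest).reverse ++ latest ++ recsB (latest.headD ' ') rest := by
  induction rest with
  | nil => intro latest _; simp [findLatestLoopA, recsF, recsB]
  | cons c r ih =>
    intro latest hne
    obtain ⟨a, t, rfl⟩ : ∃ a t, latest = a :: t := by
      cases latest with
      | nil => exact absurd rfl hne
      | cons a t => exact ⟨a, t, rfl⟩
    by_cases h : a ≤ c
    · simp only [findLatestLoopA, List.headD_cons, if_pos h, recsF, recsB]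
      rw [ih (c :: (a :: t)) (by simp)]
      simp
    · simp only [findLatestLoopA, List.headD_cons, if_neg h, recsF, recsB]
      rw [ih ((a :: t) ++ [c]) (by simp)]
      simp [h]

-- B's front filter computes exactly the record chars.
theorem zip_filter_front (rest : List Char) :
    ∀ mx : Char,
      ((rest.zip (mx :: buildMaxes mx rest)).filter (fun p => p.2 ≤ p.1)).map Prod.fst
        = recsF mx rest := by
  induction rest with
  | nil => intro mx; simp [recsF]
  | cons c r ih =>
    intro mx
    by_cases h : mx ≤ c
    · have hm : max mx c = c := max_eq_right h
      simp only [buildMaxes, List.zip_cons_cons, List.filter_cons, recsF, if_pos h]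
      simp [h, hm, ih c]
    · have hm : max mx c = mx := max_eq_left (not_le.mp h).le
      simp only [buildMaxes, List.zip_cons_cons, List.filter_cons, recsF, if_neg h]
      simp [h, hm, ih mx]

-- B's back filter computes exactly the non-record chars.
theorem zip_filter_back (rest : List Char) :
    ∀ mx : Char,
      ((rest.zip (mx :: buildMaxes mx rest)).filter (fun p => p.1 < p.2)).map Prod.fst
        = recsB mx rest := by
  induction rest with
  | nil => intro mx; simp [recsB]
  | cons c r ih =>
    intro mx
    by_cases h : mx ≤ c
    · have hm : max mx c = c := max_eq_right h
      simp only [buildMaxes, List.zip_cons_cons, List.filter_cons, recsB, if_pos h]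
      simp [not_lt.mpr h, hm, ih c]
    · have hm : max mx c = mx := max_eq_left (not_le.mp h).le
      simp only [buildMaxes, List.zip_cons_cons, List.filter_cons, recsB, if_neg h]
      simp [not_le.mp h, hm, ih mx]

-- ===== VERDICT (by name: the statement is the Claim_ definition above) =====
theorem findLatest_spec : Claim_equal_findLatest := by
  intro string _
  unfold Spec_findLatest findLatest findLatest_alt
  cases hs : string.toList with
  | nil => rfl
  | cons c0 rest =>
    have hmx : buildMaxes c0 (c0 :: rest) = c0 :: buildMaxes c0 rest := by
      simp [buildMaxes]
    refine congrArg String.mk ?_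
    rw [loopA_char rest [c0] (by simp), hmx, zip_filter_front, zip_filter_back]
    simp
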